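-- pv_equiv track=rewrite | github.com/febos/SQUARNA | SQRNdbnseq.py | PreStemsFromDiag
-- ===== SOURCE A (Python) =====
-- def PreStemsFromDiag(diag):
--     "Return longest sequences of consecutive bps"""
--     prestems = []
--
--     firstbp = -1
--
--     for i, pos in enumerate(diag):
--
--         isbp, val, bp = pos
--
--         # if first bp of the stem
--         if isbp and firstbp < 0:
--             firstbp = i
--
--         # if first non-bp after the stem
--         if not isbp and firstbp >= 0:
--             prestems.append(diag[firstbp:i])
--             firstbp = -1
--
--     #if the diagonal ends with a stem
--     if firstbp >= 0:
--         prestems.append(diag[firstbp:])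
--
--     return prestems
-- ===== SOURCE B (Python) =====
-- def PreStemsFromDiag(diag):
--     "Return longest sequences of consecutive bps"""
--     prestems = []
--     rest = diag
--     while rest:
--         flag = rest[0][0]
--         run = [rest[0]]
--         rest = rest[1:]
--         while rest and rest[0][0] == flag:
--             run.append(rest[0])
--             rest = rest[1:]
--         if flag:
--             prestems.append(run)
--     return prestems
-- ===== Notes on version B (the rewrite author's own statement) =====
-- stated objective: simpler
-- what changed: A's sentinel-index state machine (firstbp flag, enumerate, slicing back into diag, trailing-stem fixup) is replaced by a run-splitting loop that peels one maximal equal-flag run per iteration and keeps it iff it is a bp run, with no sentinel state and no post-loop fixup.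
import Mathlib
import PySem

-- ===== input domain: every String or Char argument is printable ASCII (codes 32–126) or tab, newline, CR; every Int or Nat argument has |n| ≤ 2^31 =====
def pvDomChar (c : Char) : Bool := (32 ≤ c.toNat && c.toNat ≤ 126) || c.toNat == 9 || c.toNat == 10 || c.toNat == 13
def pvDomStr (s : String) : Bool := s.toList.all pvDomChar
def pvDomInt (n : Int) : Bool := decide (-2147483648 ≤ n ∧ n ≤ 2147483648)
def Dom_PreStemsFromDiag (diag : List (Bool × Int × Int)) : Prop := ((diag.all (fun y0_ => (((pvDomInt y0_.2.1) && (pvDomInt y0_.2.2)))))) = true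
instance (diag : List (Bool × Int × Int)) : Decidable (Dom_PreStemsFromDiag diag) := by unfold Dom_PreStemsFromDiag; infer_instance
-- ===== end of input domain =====

-- B replaces A's sentinel-index state machine with a run-splitting loop (peel one maximal
-- equal-flag run at a time, keep it if it is a bp run); objective: simpler decomposition.

-- ===== PORT A =====
-- one iteration of A's for-loop: state = (prestems, firstbp), element = (i, pos)
def pvStepA (diag : List (Bool × Int × Int)) (st : List (List (Bool × Int × Int)) × Int)
    (ip : Int × (Bool × Int × Int)) : List (List (Bool × Int × Int)) × Int :=
  let isbp := ip.2.1
  let f1 : Int := if isbp && decide (st.2 < 0) then ip.1 else st.2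
  if (!isbp) && decide (0 ≤ f1) then
    (st.1 ++ [PySem.List.slice diag (some f1) (some ip.1)], -1)
  else (st.1, f1)

-- the trailing 'if firstbp >= 0' after the loop
def pvFinA (diag : List (Bool × Int × Int)) (st : List (List (Bool × Int × Int)) × Int) :
    List (List (Bool × Int × Int)) :=
  if 0 ≤ st.2 then st.1 ++ [PySem.List.slice diag (some st.2) none] else st.1

def PreStemsFromDiag (diag : List (Bool × Int × Int)) : List (List (Bool × Int × Int)) :=
  pvFinA diag ((PySem.List.enumerate diag 0).foldl (pvStepA diag) ([], -1))

-- ===== PORT B =====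
-- inner while: extend `run` while the next element has the same flag
def pvInnerB (flag : Bool) (run rest : List (Bool × Int × Int)) :
    List (Bool × Int × Int) × List (Bool × Int × Int) :=
  match rest with
  | [] => (run, [])
  | p :: t => if p.1 == flag then pvInnerB flag (run ++ [p]) t else (run, p :: t)

-- cited by pvOuterB's decreasing_by
lemma pvInnerB_snd_length (rest : List (Bool × Int × Int)) (flag : Bool)
    (run : List (Bool × Int × Int)) : (pvInnerB flag run rest).2.length ≤ rest.length := by
  induction rest generalizing run with
  | nil => simp [pvInnerB]
  | cons p t ih =>
      simp only [pvInnerB]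
      split
      · exact Nat.le_succ_of_le (ih _)
      · simp

-- outer while: peel one maximal run per iteration, keep it iff it is a bp-run
def pvOuterB (acc : List (List (Bool × Int × Int))) (rest : List (Bool × Int × Int)) :
    List (List (Bool × Int × Int)) :=
  match rest with
  | [] => acc
  | p :: t =>
      let pr := pvInnerB p.1 [p] t
      pvOuterB (if p.1 then acc ++ [pr.1] else acc) pr.2
termination_by rest.length
decreasing_by
  exact Nat.lt_succ_of_le (pvInnerB_snd_length t p.1 [p])

def PreStemsFromDiag_alt (diag : List (Bool × Int × Int)) : List (List (Bool × Int × Int)) :=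
  pvOuterB [] diag

-- ===== PRECONDITION & SPEC =====
def Spec_PreStemsFromDiag (diag : List (Bool × Int × Int)) (out : List (List (Bool × Int × Int))) : Prop := out = PreStemsFromDiag_alt diag
instance (diag : List (Bool × Int × Int)) (out : List (List (Bool × Int × Int))) : Decidable (Spec_PreStemsFromDiag diag out) := by unfold Spec_PreStemsFromDiag; infer_instance

-- ===== CLAIM (what is proved, stated in full; the proofs are below) =====
def Claim_equal_PreStemsFromDiag : Prop := ∀ (diag : List (Bool × Int × Int)), Dom_PreStemsFromDiag diag → Spec_PreStemsFromDiag diag (PreStemsFromDiag diag)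

-- ===== LEMMAS AND PROOFS =====
lemma pvInnerB_fst (rest : List (Bool × Int × Int)) (flag : Bool)
    (run : List (Bool × Int × Int)) :
    (pvInnerB flag run rest).1 = run ++ rest.takeWhile (fun q => q.1 == flag) := by
  induction rest generalizing run with
  | nil => simp [pvInnerB]
  | cons p t ih =>
      simp only [pvInnerB, List.takeWhile]
      by_cases h : p.1 == flag
      · simp [h, ih]
      · simp [h]

lemma pvInnerB_snd (rest : List (Bool × Int × Int)) (flag : Bool)
    (run : List (Bool × Int × Int)) :
    (pvInnerB flag run rest).2 = rest.dropWhile (fun q => q.1 == flag) := by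
  induction rest generalizing run with
  | nil => simp [pvInnerB]
  | cons p t ih =>
      simp only [pvInnerB, List.dropWhile]
      by_cases h : p.1 == flag
      · simp [h, ih]
      · simp [h]

lemma pvOuterB_nil (acc : List (List (Bool × Int × Int))) : pvOuterB acc [] = acc := by
  rw [pvOuterB]

lemma pvOuterB_cons (acc : List (List (Bool × Int × Int))) (p : Bool × Int × Int)
    (t : List (Bool × Int × Int)) :
    pvOuterB acc (p :: t) =
      pvOuterB (if p.1 then acc ++ [p :: t.takeWhile (fun q => q.1 == p.1)] else acc)
        (t.dropWhile (fun q => q.1 == p.1)) := by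
  rw [pvOuterB]
  simp [pvInnerB_fst, pvInnerB_snd]

lemma pvOuterB_skip_false (acc : List (List (Bool × Int × Int))) (p : Bool × Int × Int)
    (t : List (Bool × Int × Int)) (hp : p.1 = false) :
    pvOuterB acc (p :: t) = pvOuterB acc t := by
  rw [pvOuterB_cons]
  simp only [hp, if_neg Bool.false_ne_true]
  cases t with
  | nil => simp [pvOuterB_nil]
  | cons q t' =>
      by_cases hq : q.1 = false
      · rw [List.dropWhile_cons_of_pos (by simp [hq]), pvOuterB_cons acc q t']
        simp [hq]
      · rw [List.dropWhile_cons_of_neg (by simp [hq])]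

-- the element at index i, read off from the suffix
lemma drop_take_succ (diag : List (Bool × Int × Int)) (f i : Nat) (p : Bool × Int × Int)
    (t : List (Bool × Int × Int)) (hfi : f ≤ i) (h : diag.drop i = p :: t) :
    (diag.drop f).take (i + 1 - f) = (diag.drop f).take (i - f) ++ [p] := by
  have hi : diag[i]? = some p := by
    have : (diag.drop i)[0]? = some p := by simp [h]
    simpa using this
  have h2 : (diag.drop f)[i - f]? = some p := by
    rw [List.getElem?_drop]
    rwa [Nat.add_sub_cancel' hfi]
  have : i + 1 - f = (i - f) + 1 := by omega
  rw [this, List.take_succ, h2]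
  rfl

-- The joint loop invariant: A's fold over the suffix diag.drop i, in both states
-- (firstbp = -1, and firstbp = f ≥ 0), equals B's run-splitting loop.
lemma pvMain (diag : List (Bool × Int × Int)) :
    ∀ (l : List (Bool × Int × Int)) (i : Nat) (acc : List (List (Bool × Int × Int))),
      diag.drop i = l →
      (pvFinA diag ((PySem.List.enumerate l (i : Int)).foldl (pvStepA diag) (acc, -1)) =
        pvOuterB acc l) ∧
      (∀ f : Nat, f < i →
        pvFinA diag ((PySem.List.enumerate l (i : Int)).foldl (pvStepA diag) (acc, (f : Int))) =
          pvOuterB (acc ++ [(diag.drop f).take (i - f) ++ l.takeWhile (fun q => q.1 == true)])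
            (l.dropWhile (fun q => q.1 == true))) := by
  intro l
  induction l with
  | nil =>
      intro i acc hdrop
      constructor
      · simp [PySem.List.enumerate_nil, pvFinA, pvOuterB_nil]
      · intro f hf
        have hlen : diag.length ≤ i := List.drop_eq_nil_iff.mp hdrop
        have htake : (diag.drop f).take (i - f) = diag.drop f :=
          List.take_of_length_le (by simp; omega)
        simp [PySem.List.enumerate_nil, pvFinA, PySem.List.slice_from_natCast,
          pvOuterB_nil, htake]
  | cons p t ih =>
      intro i acc hdrop
      have ht : diag.drop (i + 1) = t := by
        have : diag.drop (i + 1) = (diag.drop i).drop 1 := by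
          rw [List.drop_drop]
        rw [this, hdrop]; rfl
      have hstep : ∀ (st : List (List (Bool × Int × Int)) × Int),
          (PySem.List.enumerate (p :: t) (i : Int)).foldl (pvStepA diag) st =
          (PySem.List.enumerate t ((i : Int) + 1)).foldl (pvStepA diag)
            (pvStepA diag st ((i : Int), p)) := by
        intro st; rw [PySem.List.enumerate_cons]; rfl
      have hcast : (i : Int) + 1 = ((i + 1 : Nat) : Int) := by push_cast; ring
      constructor
      · -- state firstbp = -1
        by_cases hp : p.1 = true
        · -- p starts a stem: firstbp := i
          have hA : pvStepA diag (acc, -1) ((i : Int), p) = (acc, (i : Int)) := by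
            simp [pvStepA, hp]
          rw [hstep, hA, hcast]
          have := (ih (i + 1) acc ht).2 i (by omega)
          rw [this]
          have htake1 : (diag.drop i).take (i + 1 - i) = [p] := by
            rw [hdrop]; simp
          rw [htake1, pvOuterB_cons, hp]
          simp
        · -- p is not a bp: no-op iteration
          have hp' : p.1 = false := by simpa [hp] using Bool.eq_false_iff.mpr hp
          have hA : pvStepA diag (acc, -1) ((i : Int), p) = (acc, -1) := by
            simp [pvStepA, hp']
          rw [hstep, hA, hcast, (ih (i + 1) acc ht).1]
          exact (pvOuterB_skip_false acc p t hp').symm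
      · -- state firstbp = f ≥ 0
        intro f hf
        by_cases hp : p.1 = true
        · -- stem continues
          have hA : pvStepA diag (acc, (f : Int)) ((i : Int), p) = (acc, (f : Int)) := by
            simp [pvStepA, hp]
          rw [hstep, hA, hcast]
          have := (ih (i + 1) acc ht).2 f (by omega)
          rw [this, drop_take_succ diag f i p t (by omega) hdrop]
          rw [List.takeWhile_cons_of_pos (by simp [hp]),
            List.dropWhile_cons_of_pos (by simp [hp])]
          simp
        · -- stem closes here: append diag[f:i]
          have hp' : p.1 = false := by simpa [hp] using Bool.eq_false_iff.mpr hp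
          have hA : pvStepA diag (acc, (f : Int)) ((i : Int), p) =
              (acc ++ [PySem.List.slice diag (some (f : Int)) (some (i : Int))], -1) := by
            simp [pvStepA, hp']
          rw [hstep, hA, hcast]
          rw [(ih (i + 1) (acc ++ [PySem.List.slice diag (some (f : Int)) (some (i : Int))]) ht).1]
          rw [PySem.List.slice_natCast]
          rw [List.takeWhile_cons_of_neg (by simp [hp']),
            List.dropWhile_cons_of_neg (by simp [hp'])]
          simp only [List.takeWhile_nil, List.append_nil]
          exact (pvOuterB_skip_false _ p t hp').symm

-- ===== VERDICT (by name: the statement is the Claim_ definition above) =====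
theorem PreStemsFromDiag_spec : Claim_equal_PreStemsFromDiag := by
  intro diag _
  unfold Spec_PreStemsFromDiag PreStemsFromDiag PreStemsFromDiag_alt
  have := (pvMain diag diag 0 [] (by simp)).1
  simpa using this
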